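-- pv_equiv track=rewrite | github.com/CHAQ-89/Python-Tutorials | game/xem_boi.py | xem_boi
-- ===== SOURCE A (Python) =====
-- def xem_boi(a, b):
--     a = a.lower()
--     b = b.lower()
--     count = 0
--     for i in range(ord('a'), ord('z') + 1):
--         if chr(i) in a and chr(i) in b:
--             count += 1
--         if count >= 3:
--             result = 'Hop nhau'
--         elif 0 < count < 3:
--             result = 'Lam ban'
--         else:
--             result = 'Khong hop'
--     return result
-- ===== SOURCE B (Python) =====
-- def xem_boi(a, b):
--     shared = set(a.lower()) & set(b.lower()) & set('abcdefghijklmnopqrstuvwxyz')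
--     count = len(shared)
--     if count >= 3:
--         return 'Hop nhau'
--     if count > 0:
--         return 'Lam ban'
--     return 'Khong hop'
-- ===== Notes on version B (the rewrite author's own statement) =====
-- stated objective: simpler
-- what changed: Replaces the 26-iteration loop with per-letter substring probes (and its repeated in-loop result reassignment) by one set intersection of the two lowercased strings with the alphabet, then a single three-way branch on its size.
import Mathlib
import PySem

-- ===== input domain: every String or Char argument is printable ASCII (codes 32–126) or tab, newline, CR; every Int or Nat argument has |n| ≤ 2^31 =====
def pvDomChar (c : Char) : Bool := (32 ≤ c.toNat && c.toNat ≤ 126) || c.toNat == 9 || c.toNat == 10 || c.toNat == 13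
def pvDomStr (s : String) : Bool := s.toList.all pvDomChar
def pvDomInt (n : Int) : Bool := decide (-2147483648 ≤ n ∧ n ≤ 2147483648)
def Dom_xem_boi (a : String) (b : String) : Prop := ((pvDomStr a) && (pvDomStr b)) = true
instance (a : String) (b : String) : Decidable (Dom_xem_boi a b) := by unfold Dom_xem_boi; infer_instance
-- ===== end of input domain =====

-- B replaces A's 26-iteration alphabet loop (with its per-letter substring probes and
-- repeated in-loop result reassignment) by one set intersection of the two lowercased
-- strings with the alphabet, then a single three-way branch on its size (objective: simpler).

-- ===== PORT A =====
-- loop body of A's 'for i in range(ord('a'), ord('z')+1)' loop, state = (count, result)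
def pvStepA (a' b' : String) (s : Int × String) (i : Int) : Int × String :=
  let count := if PySem.Str.isIn (String.singleton (Char.ofNat i.toNat)) a' &&
                  PySem.Str.isIn (String.singleton (Char.ofNat i.toNat)) b'
               then s.1 + 1 else s.1
  let result := if count ≥ 3 then "Hop nhau"
                else if 0 < count ∧ count < 3 then "Lam ban"
                else "Khong hop"
  (count, result)

def xem_boi (a : String) (b : String) : String :=
  let a' := PySem.Str.lower a
  let b' := PySem.Str.lower b
  ((PySem.List.pyRange 97 123 1).foldl (pvStepA a' b') ((0 : Int), "")).2

-- ===== PORT B =====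
def xem_boi_alt (a : String) (b : String) : String :=
  let shared := PySem.Set.inter
      (PySem.Set.inter (PySem.Set.ofList (PySem.Str.lower a).toList)
                       (PySem.Set.ofList (PySem.Str.lower b).toList))
      (PySem.Set.ofList "abcdefghijklmnopqrstuvwxyz".toList)
  let count := shared.length
  if count ≥ 3 then "Hop nhau"
  else if count > 0 then "Lam ban"
  else "Khong hop"

-- ===== PRECONDITION & SPEC =====
def Spec_xem_boi (a : String) (b : String) (out : String) : Prop := out = xem_boi_alt a b
instance (a : String) (b : String) (out : String) : Decidable (Spec_xem_boi a b out) := by unfold Spec_xem_boi; infer_instance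

-- ===== CLAIM (what is proved, stated in full; the proofs are below) =====
def Claim_equal_xem_boi : Prop := ∀ (a : String) (b : String), Dom_xem_boi a b → Spec_xem_boi a b (xem_boi a b)

-- ===== LEMMAS AND PROOFS =====

-- A's per-letter membership probe: 'chr(i) in s' for a single char is list membership
lemma pvIsIn_singleton (c : Char) (l : List Char) :
    PySem.Chars.isIn [c] l = decide (c ∈ l) := by
  rw [Bool.eq_iff_iff, PySem.Chars.isIn_iff_infix, decide_eq_true_iff]
  constructor
  · intro h; exact h.subset (List.mem_singleton_self c)
  · intro h
    obtain ⟨u, v, huv⟩ := List.append_of_mem h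
    rw [huv]
    exact ⟨u, v, by simp⟩

def pvP (a' b' : String) (i : Int) : Bool :=
  PySem.Str.isIn (String.singleton (Char.ofNat i.toNat)) a' &&
  PySem.Str.isIn (String.singleton (Char.ofNat i.toNat)) b'

def pvQ (a b : String) (c : Char) : Bool :=
  decide (c ∈ (PySem.Str.lower a).toList) && decide (c ∈ (PySem.Str.lower b).toList)

lemma pvFold_fst (a' b' : String) (L : List Int) : ∀ (c : Int) (r : String),
    (L.foldl (pvStepA a' b') (c, r)).1 = c + (L.countP (pvP a' b') : Int) := by
  induction L with
  | nil => intro c r; simp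
  | cons x L ih =>
    intro c r
    simp only [List.foldl_cons, List.countP_cons, pvStepA, pvP]
    by_cases h : (PySem.Str.isIn (String.singleton (Char.ofNat x.toNat)) a' &&
        PySem.Str.isIn (String.singleton (Char.ofNat x.toNat)) b') = true
    · simp only [h, if_true, ih]
      push_cast
      omega
    · simp only [h, if_false, ih, Bool.false_eq_true]
      push_cast [h]
      omega

lemma pvFold_snd (a' b' : String) (L : List Int) : ∀ (c : Int) (r : String), L ≠ [] →
    (L.foldl (pvStepA a' b') (c, r)).2 =
      (if (L.foldl (pvStepA a' b') (c, r)).1 ≥ 3 then "Hop nhau"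
       else if 0 < (L.foldl (pvStepA a' b') (c, r)).1 ∧ (L.foldl (pvStepA a' b') (c, r)).1 < 3 then "Lam ban"
       else "Khong hop") := by
  induction L with
  | nil => intro c r h; exact absurd rfl h
  | cons x L ih =>
    intro c r _
    by_cases hL : L = []
    · subst hL
      simp [pvStepA]
    · simp only [List.foldl_cons]
      have := ih (pvStepA a' b' (c, r) x).1 (pvStepA a' b' (c, r) x).2 hL
      simpa using this

def pvAlpha : List Char := "abcdefghijklmnopqrstuvwxyz".toList

lemma pvAlpha_map : pvAlpha = (PySem.List.pyRange 97 123 1).map (fun i => Char.ofNat i.toNat) := by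
  decide

-- A's count = the number of alphabet letters shared by the two lowered strings
lemma pvCountA (a b : String) :
    (PySem.List.pyRange 97 123 1).countP (pvP (PySem.Str.lower a) (PySem.Str.lower b)) =
      pvAlpha.countP (pvQ a b) := by
  rw [pvAlpha_map, List.countP_map]
  apply List.countP_congr
  intro i _
  simp [pvP, pvQ, PySem.Str.isIn, pvIsIn_singleton, Function.comp]

-- B's count = the same number: the distinct shared alphabet letters
lemma pvCountB (a b : String) :
    (PySem.Set.inter
        (PySem.Set.inter (PySem.Set.ofList (PySem.Str.lower a).toList)
                         (PySem.Set.ofList (PySem.Str.lower b).toList))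
        (PySem.Set.ofList "abcdefghijklmnopqrstuvwxyz".toList)).length =
      pvAlpha.countP (pvQ a b) := by
  rw [List.countP_eq_length_filter]
  have hnodupS : (PySem.Set.inter
      (PySem.Set.inter (PySem.Set.ofList (PySem.Str.lower a).toList)
                       (PySem.Set.ofList (PySem.Str.lower b).toList))
      (PySem.Set.ofList "abcdefghijklmnopqrstuvwxyz".toList)).Nodup :=
    ((PySem.Set.nodup_ofList _).filter _).filter _
  have hnodupF : (pvAlpha.filter (pvQ a b)).Nodup := by
    have h : pvAlpha.Nodup := by decide
    exact h.filter _
  rw [← List.toFinset_card_of_nodup hnodupS, ← List.toFinset_card_of_nodup hnodupF]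
  congr 1
  ext c
  simp only [List.mem_toFinset, List.mem_filter, PySem.Set.inter, PySem.Set.contains_iff,
    PySem.Set.mem_ofList, pvQ, Bool.and_eq_true, decide_eq_true_iff, pvAlpha]
  exact ⟨fun h => ⟨h.2, h.1.1, h.1.2⟩, fun h => ⟨⟨h.2.1, h.2.2⟩, h.1⟩⟩

lemma pvMain (a b : String) : xem_boi a b = xem_boi_alt a b := by
  have hne : PySem.List.pyRange 97 123 1 ≠ [] := by
    rw [PySem.List.pyRange_one_cons (by norm_num)]
    simp
  simp only [xem_boi, xem_boi_alt]
  rw [pvFold_snd _ _ _ 0 "" hne, pvFold_fst, pvCountA, ← pvCountB]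
  split_ifs <;> first | rfl | (exfalso; omega)

-- ===== VERDICT (by name: the statement is the Claim_ definition above) =====
theorem xem_boi_spec : Claim_equal_xem_boi := by
  intro a b _
  show xem_boi a b = xem_boi_alt a b
  exact pvMain a b
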